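-- pv_equiv track=rewrite | github.com/PrithaSarkar/PokeJong | game.py | _check_recursive
-- ===== SOURCE A (Python) =====
-- from typing import Dict, List, Optional
--
-- def _check_recursive(counts: Dict[int, int], has_pair: bool) -> bool:
--     """Recursive function to check for 4 Melds (Pung/Kong) + 1 Pair in tile counts."""
--     # Base Case 1: All the tiles have been consumed and a pair has been found = WIN!!
--     if all(count == 0 for count in counts.values()):
--         return has_pair
--
--     # Find the next tile ID to process (smallest ID with count > 0)
--     current_tile_id = min((tile_id for tile_id, count in counts.items() if count > 0), default = None)
--     if current_tile_id is None:
--         return False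
--
--     original_count = counts[current_tile_id]
--     # Try to form the PAIR / THE EYE
--     if not has_pair and original_count >= 2:
--         test_counts = counts.copy()
--         test_counts[current_tile_id] -= 2
--         if _check_recursive(test_counts, has_pair=True):
--             return True
--
--     # Try to form a PUNG (Triplet: 3 identical tiles)
--     if original_count >= 3:
--         test_counts = counts.copy()
--         test_counts[current_tile_id] -= 3
--         if _check_recursive(test_counts, has_pair):
--             return True
--
--     return False
-- ===== SOURCE B (Python) =====
-- def _check_recursive(counts, has_pair):
--     """Residue check: a win needs every count to split into pungs (x3) plus at most
--     one pair; so all counts must be >= 0 and == 0 or 2 mod 3, with exactly one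
--     residue-2 count iff the pair is still needed."""
--     pairs_needed = 0 if has_pair else 1
--     for count in counts.values():
--         if count < 0:
--             return False
--         r = count % 3
--         if r == 2:
--             pairs_needed -= 1
--         elif r != 0:
--             return False
--     return pairs_needed == 0
-- ===== Notes on version B (the rewrite author's own statement) =====
-- stated objective: faster
-- what changed: Replaces the branching recursion (copy the dict, try removing a pair and/or a pung, recurse) with a single linear pass checking each count's residue mod 3 and that exactly one residue-2 count exists iff the pair is still needed.
import Mathlib
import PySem

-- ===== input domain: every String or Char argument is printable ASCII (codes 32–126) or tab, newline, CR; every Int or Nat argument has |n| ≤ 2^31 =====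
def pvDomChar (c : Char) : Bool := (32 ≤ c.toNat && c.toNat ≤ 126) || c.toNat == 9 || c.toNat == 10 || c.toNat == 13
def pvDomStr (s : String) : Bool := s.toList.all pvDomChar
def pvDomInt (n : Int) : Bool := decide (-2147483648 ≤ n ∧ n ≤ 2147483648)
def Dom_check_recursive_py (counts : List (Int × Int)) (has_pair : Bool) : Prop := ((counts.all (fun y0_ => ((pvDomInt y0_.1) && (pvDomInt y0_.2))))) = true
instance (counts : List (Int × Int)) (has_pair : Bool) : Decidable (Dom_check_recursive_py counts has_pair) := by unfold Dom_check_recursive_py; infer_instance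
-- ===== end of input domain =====

-- B replaces A's exponential try-pair/try-pung recursion (with dict copies) by one
-- linear pass over the counts checking residues mod 3.  The dict argument is the
-- association list `counts`; Pre_ requires distinct keys (any Python dict has them).

-- ===== PORT A =====
-- sum of the positive parts of the counts: the termination measure of A's recursion
def pvSumPos (l : List (Int × Int)) : Nat := (l.map (fun p => p.2.toNat)).sum

-- counts[k] (the key is always present where A reads it; 0 is a dead default)
def pvLookup : List (Int × Int) → Int → Int
  | [], _ => 0
  | p :: rest, k => if p.1 == k then p.2 else pvLookup rest k

-- test_counts[k] = v on a dict: replace the value at the (unique) occurrence of k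
def pvSetFirst : List (Int × Int) → Int → Int → List (Int × Int)
  | [], _, _ => []
  | p :: rest, k, v => if p.1 == k then (k, v) :: rest else p :: pvSetFirst rest k v

lemma pvSumPos_setFirst_lt (l : List (Int × Int)) (k v : Int)
    (h1 : v < pvLookup l k) (h2 : 0 < pvLookup l k) :
    pvSumPos (pvSetFirst l k v) < pvSumPos l := by
  induction l with
  | nil => simp [pvLookup] at h2
  | cons p rest ih =>
    by_cases hk : (p.1 == k) = true
    · simp only [pvLookup, hk, if_true] at h1 h2
      simp only [pvSetFirst, hk, if_true, pvSumPos, List.map, List.sum_cons]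
      omega
    · rw [Bool.not_eq_true] at hk
      simp only [pvLookup, hk, Bool.false_eq_true, if_false] at h1 h2
      simp only [pvSetFirst, hk, Bool.false_eq_true, if_false, pvSumPos, List.map, List.sum_cons]
      have := ih h1 h2
      simp only [pvSumPos] at this
      omega

def check_recursive_py (counts : List (Int × Int)) (has_pair : Bool) : Bool :=
  if counts.all (fun p => p.2 == 0) then has_pair
  else
    match PySem.List.min? ((counts.filter (fun p => 0 < p.2)).map (fun p => p.1)) (fun x => x) with
    | none => false
    | some tid =>
      -- original_count = counts[tid]; the key is present, so the lookup is exact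
      (if h2 : !has_pair && 2 ≤ pvLookup counts tid then
         check_recursive_py (pvSetFirst counts tid (pvLookup counts tid - 2)) true
       else false)
      || (if h3 : 3 ≤ pvLookup counts tid then
            check_recursive_py (pvSetFirst counts tid (pvLookup counts tid - 3)) has_pair
          else false)
termination_by pvSumPos counts
decreasing_by
  · simp only [Bool.and_eq_true, decide_eq_true_eq] at h2
    exact pvSumPos_setFirst_lt _ _ _ (by omega) (by omega)
  · exact pvSumPos_setFirst_lt _ _ _ (by omega) (by omega)

-- ===== PORT B =====
def pvAltGo : List Int → Int → Bool
  | [], pairs_needed => pairs_needed == 0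
  | c :: rest, pairs_needed =>
    if c < 0 then false
    else
      let r := PySem.Int.mod c 3
      if r == 2 then pvAltGo rest (pairs_needed - 1)
      else if r != 0 then false
      else pvAltGo rest pairs_needed

def check_recursive_py_alt (counts : List (Int × Int)) (has_pair : Bool) : Bool :=
  pvAltGo (counts.map (fun p => p.2)) (if has_pair then 0 else 1)

-- ===== PRECONDITION & SPEC =====
-- Pre_ requires distinct keys: the argument stands for a Python dict, which cannot
-- contain duplicate keys, so no input A accepts is excluded.
def Pre_check_recursive_py (counts : List (Int × Int)) (has_pair : Bool) : Prop :=
  (counts.map (fun p => p.1)).Nodup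
instance (counts : List (Int × Int)) (has_pair : Bool) : Decidable (Pre_check_recursive_py counts has_pair) := by unfold Pre_check_recursive_py; infer_instance

def pvWitness_check_recursive_py : (List (Int × Int)) × Bool := ([(1, 3), (2, 2)], false)

def Spec_check_recursive_py (counts : List (Int × Int)) (has_pair : Bool) (out : Bool) : Prop := out = check_recursive_py_alt counts has_pair
instance (counts : List (Int × Int)) (has_pair : Bool) (out : Bool) : Decidable (Spec_check_recursive_py counts has_pair out) := by unfold Spec_check_recursive_py; infer_instance

-- ===== CLAIM (what is proved, stated in full; the proofs are below) =====
def Claim_equal_check_recursive_py : Prop := ∀ (counts : List (Int × Int)) (has_pair : Bool), Dom_check_recursive_py counts has_pair → Pre_check_recursive_py counts has_pair → Spec_check_recursive_py counts has_pair (check_recursive_py counts has_pair)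

-- ===== LEMMAS AND PROOFS =====

lemma pvmod3 (c : Int) : PySem.Int.mod c 3 = c % 3 := by
  show c.fmod 3 = c % 3
  rw [Int.fmod_eq_emod]; simp

-- a count is consumable by pungs (+ at most the pair counted separately)
def pvOk (c : Int) : Bool := decide (0 ≤ c) && (c % 3 == 0 || c % 3 == 2)

-- the residue characterisation both programs compute
def pvSpecB (counts : List (Int × Int)) (hp : Bool) : Bool :=
  (counts.map (fun p => p.2)).all pvOk &&
  ((if hp then (0 : Int) else 1) ==
    ((counts.map (fun p => p.2)).countP (fun c => c % 3 == 2) : Int))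

lemma pvAltGo_eq (l : List Int) : ∀ pn : Int,
    pvAltGo l pn = (l.all pvOk && (pn == (l.countP (fun c => c % 3 == 2) : Int))) := by
  induction l with
  | nil => intro pn; simp [pvAltGo]
  | cons c rest ih =>
    intro pn
    simp only [pvAltGo, pvmod3]
    by_cases hc : c < 0
    · simp [hc, pvOk, show ¬ (0 ≤ c) by omega]
    · by_cases h2 : c % 3 = 2
      · simp only [hc, if_false, h2, ih, List.all_cons, List.countP_cons, pvOk,
          show (0 ≤ c) by omega, decide_true, Bool.true_and]
        cases hall : rest.all pvOk <;>
          simp_all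
        omega
      · by_cases h0 : c % 3 = 0
        · simp [hc, h0, ih, pvOk, show (0 ≤ c) by omega]
        · simp [hc, h0, h2, pvOk]

lemma pvAlt_eq (counts : List (Int × Int)) (hp : Bool) :
    check_recursive_py_alt counts hp = pvSpecB counts hp := by
  rw [check_recursive_py_alt, pvAltGo_eq, pvSpecB]

lemma pvLookup_split (l1 l2 : List (Int × Int)) (tid c : Int)
    (h : tid ∉ l1.map (fun p => p.1)) :
    pvLookup (l1 ++ (tid, c) :: l2) tid = c := by
  induction l1 with
  | nil => simp [pvLookup]
  | cons p t ih =>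
    simp only [List.map_cons, List.mem_cons, not_or] at h
    have : (p.1 == tid) = false := by
      simp only [beq_eq_false_iff_ne, ne_eq]; exact fun he => h.1 he.symm
    simp [pvLookup, this, ih h.2]

lemma pvSetFirst_split (l1 l2 : List (Int × Int)) (tid c v : Int)
    (h : tid ∉ l1.map (fun p => p.1)) :
    pvSetFirst (l1 ++ (tid, c) :: l2) tid v = l1 ++ (tid, v) :: l2 := by
  induction l1 with
  | nil => simp [pvSetFirst]
  | cons p t ih =>
    simp only [List.map_cons, List.mem_cons, not_or] at h
    have : (p.1 == tid) = false := by
      simp only [beq_eq_false_iff_ne, ne_eq]; exact fun he => h.1 he.symm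
    simp [pvSetFirst, this, ih h.2]

lemma pvSumPos_append (l1 l2 : List (Int × Int)) (tid x : Int) :
    pvSumPos (l1 ++ (tid, x) :: l2) = pvSumPos l1 + x.toNat + pvSumPos l2 := by
  simp [pvSumPos]; omega

lemma pvSpecB_split (l1 l2 : List (Int × Int)) (k x : Int) (hp : Bool) :
    pvSpecB (l1 ++ (k, x) :: l2) hp =
      (pvOk x && ((l1.map (fun p => p.2)).all pvOk && (l2.map (fun p => p.2)).all pvOk) &&
       ((if hp then (0 : Int) else 1) ==
         (((l1.map (fun p => p.2)).countP (fun c => c % 3 == 2) +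
           (l2.map (fun p => p.2)).countP (fun c => c % 3 == 2) : Nat) : Int) +
         (if x % 3 = 2 then (1 : Int) else 0))) := by
  simp only [pvSpecB, List.map_append, List.map_cons, List.all_append, List.all_cons,
    List.countP_append, List.countP_cons, beq_iff_eq]
  cases hA1 : (l1.map (fun p => p.2)).all pvOk <;>
    cases hA2 : (l2.map (fun p => p.2)).all pvOk <;>
    cases hOk : pvOk x <;>
    (try simp only [Bool.false_and, Bool.and_false, Bool.true_and, Bool.and_true])
  rw [Bool.eq_iff_iff]
  simp only [beq_iff_eq]
  split_ifs <;> omega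

lemma pvCore (A : Bool) (K : Nat) (c : Int) (hp : Bool) (hc : 0 < c) :
    ((if (!hp && decide (2 ≤ c)) = true then
        (pvOk (c - 2) && A && ((0 : Int) == (K : Int) + (if (c - 2) % 3 = 2 then (1 : Int) else 0)))
      else false) ||
     (if 3 ≤ c then
        (pvOk (c - 3) && A && ((if hp = true then (0 : Int) else 1) == (K : Int) + (if (c - 3) % 3 = 2 then (1 : Int) else 0)))
      else false))
    = (pvOk c && A && ((if hp = true then (0 : Int) else 1) == (K : Int) + (if c % 3 = 2 then (1 : Int) else 0))) := by
  cases hp <;> cases A <;>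
    simp only [Bool.not_true, Bool.not_false, Bool.true_and, Bool.false_and, Bool.and_true,
      Bool.and_false, Bool.false_eq_true, if_true, if_false, Bool.or_self, ite_self,
      decide_eq_true_eq]
  all_goals (rw [Bool.eq_iff_iff]; simp only [Bool.or_eq_true]; split_ifs <;> simp [pvOk] <;> omega)

lemma pvMainA : ∀ (n : Nat) (counts : List (Int × Int)) (hp : Bool),
    pvSumPos counts = n → (counts.map (fun p => p.1)).Nodup →
    check_recursive_py counts hp = pvSpecB counts hp := by
  intro n
  induction n using Nat.strong_induction_on with
  | _ n ih =>
  intro counts hp hsum hnd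
  rw [check_recursive_py]
  by_cases hall : counts.all (fun p => p.2 == 0) = true
  · rw [if_pos hall]
    have hv : ∀ p ∈ counts, p.2 = 0 := by
      intro p hpm; have := List.all_eq_true.mp hall p hpm; simpa using this
    have h1 : (counts.map (fun p => p.2)).all pvOk = true := by
      rw [List.all_eq_true]; intro c hcm
      obtain ⟨p, hpm, rfl⟩ := List.mem_map.mp hcm
      simp [pvOk, hv p hpm]
    have h2 : (counts.map (fun p => p.2)).countP (fun c => c % 3 == 2) = 0 := by
      rw [List.countP_eq_zero]; intro c hcm
      obtain ⟨p, hpm, rfl⟩ := List.mem_map.mp hcm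
      simp [hv p hpm]
    cases hp <;> simp [pvSpecB, h1, h2]
  · rw [if_neg hall]
    obtain ⟨p0, hp0m, hp0⟩ : ∃ p ∈ counts, ¬ ((p.2 == 0) = true) := by
      by_contra hcon; push_neg at hcon
      exact hall (List.all_eq_true.mpr hcon)
    simp only [beq_iff_eq] at hp0
    split
    · rename_i hmin
      have hfil : (counts.filter (fun p => 0 < p.2)).map (fun p => p.1) = [] :=
        (PySem.List.min?_eq_none_iff _ _).mp hmin
      have hfil2 : counts.filter (fun p => decide (0 < p.2)) = [] :=
        List.map_eq_nil_iff.mp hfil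
      have hnonpos : ∀ p ∈ counts, ¬ (0 < p.2) := by
        intro p hpm hlt
        have : p ∈ counts.filter (fun p => decide (0 < p.2)) :=
          List.mem_filter.mpr ⟨hpm, by simpa using hlt⟩
        simp [hfil2] at this
      have hA : (counts.map (fun p => p.2)).all pvOk = false := by
        rw [List.all_eq_false]
        refine ⟨p0.2, List.mem_map.mpr ⟨p0, hp0m, rfl⟩, ?_⟩
        have := hnonpos p0 hp0m
        simp [pvOk]; omega
      simp [pvSpecB, hA]
    · rename_i tid hmin
      have htid := PySem.List.min?_mem hmin
      obtain ⟨q, hqf, hq1⟩ := List.mem_map.mp htid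
      have hqm : q ∈ counts ∧ 0 < q.2 := by
        have := List.mem_filter.mp hqf
        exact ⟨this.1, by simpa using this.2⟩
      obtain ⟨l1, l2, hsplit⟩ := List.append_of_mem hqm.1
      obtain ⟨k, c⟩ := q
      simp only at hq1
      subst hq1 hsplit
      have hc : 0 < c := hqm.2
      rw [List.map_append, List.map_cons] at hnd
      obtain ⟨hndl1, hndr, hdisj⟩ := List.nodup_append.mp hnd
      have hn1 : k ∉ l1.map (fun p => p.1) := by
        intro hm
        exact hdisj k hm k (by simp) rfl
      rw [pvLookup_split l1 l2 k c hn1]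
      rw [pvSetFirst_split l1 l2 k c _ hn1, pvSetFirst_split l1 l2 k c _ hn1]
      have hkey : ∀ (v : Int) (hp' : Bool), v.toNat < c.toNat →
          check_recursive_py (l1 ++ (k, v) :: l2) hp' = pvSpecB (l1 ++ (k, v) :: l2) hp' := by
        intro v hp' hv
        refine ih (pvSumPos (l1 ++ (k, v) :: l2)) ?_ _ _ rfl ?_
        · rw [← hsum, pvSumPos_append, pvSumPos_append]; omega
        · rw [List.map_append, List.map_cons]
          exact hnd
      rw [hkey (c - 2) true (by omega), hkey (c - 3) hp (by omega)]
      rw [pvSpecB_split l1 l2 k c hp, pvSpecB_split l1 l2 k (c - 2) true,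
          pvSpecB_split l1 l2 k (c - 3) hp]
      simp only [dite_eq_ite, if_true]
      exact pvCore _ _ c hp hc

-- ===== VERDICT (by name: the statement is the Claim_ definition above) =====
theorem check_recursive_py_spec : Claim_equal_check_recursive_py := by
  intro counts hp _ hpre
  unfold Spec_check_recursive_py
  rw [pvAlt_eq, pvMainA (pvSumPos counts) counts hp rfl hpre]
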